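-- pv_equiv track=rewrite | github.com/moonwho101/DungeonStompDX12UltimateDXR | tools/generate_treasure_chest.py | combine_meshes
-- ===== SOURCE A (Python) =====
-- def combine_meshes(mesh_list):
--     """Combine multiple (vertices, faces) into one mesh."""
--     all_verts = []
--     all_faces = []
--     offset = 0
--     for verts, fcs in mesh_list:
--         all_verts.extend(verts)
--         for f in fcs:
--             all_faces.append((f[0] + offset, f[1] + offset, f[2] + offset))
--         offset += len(verts)
--     return all_verts, all_faces
-- ===== SOURCE B (Python) =====
-- def combine_meshes(mesh_list):
--     """Combine multiple (vertices, faces) into one mesh."""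
--     meshes = list(mesh_list)
--     offsets = [0]
--     for verts, _ in meshes:
--         offsets.append(offsets[-1] + len(verts))
--     all_verts = [v for verts, _ in meshes for v in verts]
--     all_faces = [(f[0] + off, f[1] + off, f[2] + off)
--                  for (_, fcs), off in zip(meshes, offsets)
--                  for f in fcs]
--     return all_verts, all_faces
-- ===== Notes on version B (the rewrite author's own statement) =====
-- stated objective: alternative
-- what changed: Replaces the single accumulator-threaded loop by a precomputed cumulative-offset table plus two independent flattening passes (verts by concatenation, faces by zipping meshes with their offsets).
import Mathlib
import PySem

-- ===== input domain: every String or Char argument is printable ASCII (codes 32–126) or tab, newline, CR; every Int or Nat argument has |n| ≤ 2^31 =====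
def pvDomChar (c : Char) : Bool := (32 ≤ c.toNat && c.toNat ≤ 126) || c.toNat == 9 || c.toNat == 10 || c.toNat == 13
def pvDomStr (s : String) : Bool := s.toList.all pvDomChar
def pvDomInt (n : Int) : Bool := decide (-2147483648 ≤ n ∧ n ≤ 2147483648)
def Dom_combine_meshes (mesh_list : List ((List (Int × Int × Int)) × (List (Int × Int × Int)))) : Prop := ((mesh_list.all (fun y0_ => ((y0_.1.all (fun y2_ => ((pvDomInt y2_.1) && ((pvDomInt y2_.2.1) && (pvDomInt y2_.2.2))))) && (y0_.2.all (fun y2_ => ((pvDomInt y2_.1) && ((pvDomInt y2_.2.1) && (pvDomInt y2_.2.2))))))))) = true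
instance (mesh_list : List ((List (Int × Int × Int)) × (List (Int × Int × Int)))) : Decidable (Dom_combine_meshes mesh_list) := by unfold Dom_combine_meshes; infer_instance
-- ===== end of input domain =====

-- B replaces A's single accumulator-threaded loop with a precomputed cumulative-offset
-- table and two independent flattening passes (objective: alternative decomposition).

-- ===== PORT A =====
-- one loop threading (all_verts, all_faces, offset); inner loop over faces is a foldl
def combine_meshes (mesh_list : List ((List (Int × Int × Int)) × (List (Int × Int × Int)))) : (List (Int × Int × Int)) × (List (Int × Int × Int)) :=
  let st := mesh_list.foldl
    (fun (acc : List (Int × Int × Int) × List (Int × Int × Int) × Int) m =>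
      let verts := m.1
      let fcs := m.2
      let all_verts := acc.1 ++ verts
      let all_faces := fcs.foldl
        (fun fs f => fs ++ [(f.1 + acc.2.2, f.2.1 + acc.2.2, f.2.2 + acc.2.2)]) acc.2.1
      (all_verts, all_faces, acc.2.2 + (verts.length : Int)))
    ([], [], 0)
  (st.1, st.2.1)

-- ===== PORT B =====
-- offsets[-1]-append loop in Source B = scanl (+) 0 over the per-mesh vertex counts (one extra
-- trailing entry, discarded by zip truncation, exactly as in Source B)
def combine_meshes_alt (mesh_list : List ((List (Int × Int × Int)) × (List (Int × Int × Int)))) : (List (Int × Int × Int)) × (List (Int × Int × Int)) :=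
  let offsets : List Int := (mesh_list.map (fun m => ((m.1.length : Int)))).scanl (· + ·) 0
  let all_verts := mesh_list.flatMap (fun m => m.1)
  let all_faces := (mesh_list.zip offsets).flatMap
    (fun p => p.1.2.map (fun f => (f.1 + p.2, f.2.1 + p.2, f.2.2 + p.2)))
  (all_verts, all_faces)

-- ===== PRECONDITION & SPEC =====
def Spec_combine_meshes (mesh_list : List ((List (Int × Int × Int)) × (List (Int × Int × Int)))) (out : (List (Int × Int × Int)) × (List (Int × Int × Int))) : Prop := out = combine_meshes_alt mesh_list
instance (mesh_list : List ((List (Int × Int × Int)) × (List (Int × Int × Int)))) (out : (List (Int × Int × Int)) × (List (Int × Int × Int))) : Decidable (Spec_combine_meshes mesh_list out) := by unfold Spec_combine_meshes; infer_instance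

-- ===== CLAIM (what is proved, stated in full; the proofs are below) =====
def Claim_equal_combine_meshes : Prop := ∀ (mesh_list : List ((List (Int × Int × Int)) × (List (Int × Int × Int)))), Dom_combine_meshes mesh_list → Spec_combine_meshes mesh_list (combine_meshes mesh_list)

-- ===== LEMMAS AND PROOFS =====

-- face list emitted for one mesh at a given offset
def pvFaces (fcs : List (Int × Int × Int)) (off : Int) : List (Int × Int × Int) :=
  fcs.map (fun f => (f.1 + off, f.2.1 + off, f.2.2 + off))

theorem pvInnerFoldl (fcs : List (Int × Int × Int)) (off : Int) (facc : List (Int × Int × Int)) :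
    fcs.foldl (fun fs f => fs ++ [(f.1 + off, f.2.1 + off, f.2.2 + off)]) facc
      = facc ++ pvFaces fcs off := by
  induction fcs generalizing facc with
  | nil => simp [pvFaces]
  | cons f fs ih => rw [List.foldl_cons, ih]; simp [pvFaces]

theorem pvMainFoldl (ml : List ((List (Int × Int × Int)) × (List (Int × Int × Int))))
    (vacc facc : List (Int × Int × Int)) (off : Int) :
    (ml.foldl
      (fun (acc : List (Int × Int × Int) × List (Int × Int × Int) × Int) m =>
        (acc.1 ++ m.1, acc.2.1 ++ pvFaces m.2 acc.2.2, acc.2.2 + (m.1.length : Int)))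
      (vacc, facc, off))
    = (vacc ++ ml.flatMap (fun m => m.1),
       facc ++ (ml.zip ((ml.map (fun m => ((m.1.length : Int)))).scanl (· + ·) off)).flatMap
         (fun p => pvFaces p.1.2 p.2),
       off + ((ml.flatMap (fun m => m.1)).length : Int)) := by
  induction ml generalizing vacc facc off with
  | nil => simp
  | cons m ms ih =>
    simp only [List.foldl_cons, List.map_cons, List.scanl_cons, List.zip_cons_cons,
      List.flatMap_cons]
    rw [ih]
    simp [List.append_assoc]
    omega

theorem combine_meshes_eq (ml : List ((List (Int × Int × Int)) × (List (Int × Int × Int)))) :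
    combine_meshes ml = combine_meshes_alt ml := by
  unfold combine_meshes combine_meshes_alt
  simp only [pvInnerFoldl, pvMainFoldl]
  simp [pvFaces]

-- ===== VERDICT (by name: the statement is the Claim_ definition above) =====
theorem combine_meshes_spec : Claim_equal_combine_meshes := by
  intro ml _
  unfold Spec_combine_meshes
  exact combine_meshes_eq ml
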